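-- pv_equiv track=rewrite | github.com/AdamZhouSE/pythonHomework | Code/CodeRecords/2903/60761/255537.py | maxsublen
-- ===== SOURCE A (Python) =====
-- def maxsublen(arr,letters):
--     a=1 #假设arr[0]可以加入子字符串
--     if(len(arr)==0):
--         return len(letters)
--     for letter in arr[0]:
--         if letter in letters:
--             a=0
--             break
--     if (a==1):
--         newletters=letters+list(arr[0])
--         b=max(maxsublen(arr[1:],letters),maxsublen(arr[1:],newletters))
--         return b
--     else:
--         b=maxsublen(arr[1:],letters)
--         return b
-- ===== SOURCE B (Python) =====
-- def maxsublen(arr, letters):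
--     # Iterative DP over reachable states: each state is the accumulated letters list.
--     states = [list(letters)]
--     for s in arr:
--         nxt = []
--         for st in states:
--             nxt.append(st)
--             if all(c not in st for c in s):
--                 nxt.append(st + list(s))
--         states = nxt
--     return max(len(st) for st in states)
-- ===== Notes on version B (the rewrite author's own statement) =====
-- stated objective: alternative
-- what changed: Replaced A's binary add/skip recursion with an iterative DP that maintains the list of reachable accumulated-letters states and takes the max length at the end.
import Mathlib
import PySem

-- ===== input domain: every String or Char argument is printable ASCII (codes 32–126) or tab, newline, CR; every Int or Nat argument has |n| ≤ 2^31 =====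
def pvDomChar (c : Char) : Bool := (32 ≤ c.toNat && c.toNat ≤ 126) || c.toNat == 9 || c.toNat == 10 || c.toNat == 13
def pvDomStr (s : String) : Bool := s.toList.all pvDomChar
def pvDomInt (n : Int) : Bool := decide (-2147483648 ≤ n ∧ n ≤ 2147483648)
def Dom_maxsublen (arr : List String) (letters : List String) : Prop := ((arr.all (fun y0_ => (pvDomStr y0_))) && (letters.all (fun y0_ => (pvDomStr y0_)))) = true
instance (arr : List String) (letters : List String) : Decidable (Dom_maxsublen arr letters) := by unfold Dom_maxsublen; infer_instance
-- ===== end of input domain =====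

-- B replaces A's add/skip recursion by an iterative DP over the list of reachable
-- (accumulated-letters) states; alternative decomposition, same exponential cost.

-- ===== PORT A =====
-- literal transliteration of A's recursion (for-loop with break ported as List.any)
def maxsublen (arr : List String) (letters : List String) : Int :=
  match arr with
  | [] => (letters.length : Int)
  | s :: rest =>
    let a : Int := if s.toList.any (fun c => letters.contains (String.ofList [c])) then 0 else 1
    if a = 1 then
      let newletters := letters ++ s.toList.map (fun c => String.ofList [c])
      max (maxsublen rest letters) (maxsublen rest newletters)
    else
      maxsublen rest letters

-- ===== PORT B =====
-- one step of B's inner loop: for each state keep it and, if s is disjoint, also the extended state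
def pvStep (s : String) (states : List (List String)) : List (List String) :=
  states.foldr
    (fun st acc =>
      if s.toList.all (fun c => !(st.contains (String.ofList [c]))) then
        st :: (st ++ s.toList.map (fun c => String.ofList [c])) :: acc
      else
        st :: acc)
    []

-- max of the states' lengths (B's final `max(len(st) for st in states)`; states is never empty)
def pvMaxLen (states : List (List String)) : Int :=
  match states with
  | [] => 0
  | h :: t => t.foldl (fun m st => max m ((st.length : Int))) ((h.length : Int))

def maxsublen_alt (arr : List String) (letters : List String) : Int :=
  pvMaxLen (arr.foldl (fun sts s => pvStep s sts) [letters])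

-- ===== PRECONDITION & SPEC =====
def Spec_maxsublen (arr : List String) (letters : List String) (out : Int) : Prop := out = maxsublen_alt arr letters
instance (arr : List String) (letters : List String) (out : Int) : Decidable (Spec_maxsublen arr letters out) := by unfold Spec_maxsublen; infer_instance

-- ===== CLAIM (what is proved, stated in full; the proofs are below) =====
def Claim_equal_maxsublen : Prop := ∀ (arr : List String) (letters : List String), Dom_maxsublen arr letters → Spec_maxsublen arr letters (maxsublen arr letters)

-- ===== LEMMAS AND PROOFS =====

theorem pvStep_cons (s : String) (h : List String) (t : List (List String)) :
    pvStep s (h :: t) =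
      if s.toList.all (fun c => !(h.contains (String.ofList [c]))) then
        h :: (h ++ s.toList.map (fun c => String.ofList [c])) :: pvStep s t
      else
        h :: pvStep s t := by
  simp [pvStep, List.foldr]

theorem pvCond_eq (s : List Char) (st : List String) :
    (s.all (fun c => !(st.contains (String.ofList [c])))) =
      !(s.any (fun c => st.contains (String.ofList [c]))) := by
  induction s with
  | nil => simp
  | cons c cs ih => rw [List.all_cons, List.any_cons, Bool.not_or, ih]

-- folding max over B's stepped states equals folding max of A's value one level deeper
theorem pvFold_step (rest : List String) (s : String) (t : List (List String)) (m : Int) :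
    (pvStep s t).foldl (fun m st => max m (maxsublen rest st)) m
      = t.foldl (fun m st => max m (maxsublen (s :: rest) st)) m := by
  induction t generalizing m with
  | nil => simp [pvStep]
  | cons h t ih =>
    rw [pvStep_cons]
    by_cases hd : s.toList.all (fun c => !(h.contains (String.ofList [c]))) = true
    · have hany : (s.toList.any (fun c => h.contains (String.ofList [c]))) = false := by
        rw [pvCond_eq] at hd; simpa using hd
      rw [if_pos hd]
      simp only [List.foldl_cons]
      rw [ih]
      have : maxsublen (s :: rest) h =
          max (maxsublen rest h) (maxsublen rest (h ++ s.toList.map (fun c => String.ofList [c]))) := by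
        simp only [maxsublen, hany]; norm_num
      rw [this, max_assoc]
    · have hany : (s.toList.any (fun c => h.contains (String.ofList [c]))) = true := by
        have hd' : (s.toList.all (fun c => !(h.contains (String.ofList [c])))) = false := by
          simpa using hd
        rw [pvCond_eq] at hd'; simpa using hd'
      have : maxsublen (s :: rest) h = maxsublen rest h := by
        simp only [maxsublen, hany]; norm_num
      rw [if_neg hd, List.foldl_cons, ih, List.foldl_cons, this]

-- main invariant: the max length over the DP states equals the foldl of A's values over the states
theorem pvMain (arr : List String) (h : List String) (t : List (List String)) :
    pvMaxLen (arr.foldl (fun sts s => pvStep s sts) (h :: t))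
      = t.foldl (fun m st => max m (maxsublen arr st)) (maxsublen arr h) := by
  induction arr generalizing h t with
  | nil => simp [pvMaxLen, maxsublen]
  | cons s rest ih =>
    simp only [List.foldl_cons]
    rw [pvStep_cons]
    by_cases hd : s.toList.all (fun c => !(h.contains (String.ofList [c]))) = true
    · have hany : (s.toList.any (fun c => h.contains (String.ofList [c]))) = false := by
        rw [pvCond_eq] at hd; simpa using hd
      rw [if_pos hd, ih, List.foldl_cons, pvFold_step]
      have : maxsublen (s :: rest) h =
          max (maxsublen rest h) (maxsublen rest (h ++ s.toList.map (fun c => String.ofList [c]))) := by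
        simp only [maxsublen, hany]; norm_num
      rw [this]
    · have hany : (s.toList.any (fun c => h.contains (String.ofList [c]))) = true := by
        have hd' : (s.toList.all (fun c => !(h.contains (String.ofList [c])))) = false := by
          simpa using hd
        rw [pvCond_eq] at hd'; simpa using hd'
      have : maxsublen (s :: rest) h = maxsublen rest h := by
        simp only [maxsublen, hany]; norm_num
      rw [if_neg hd, ih, pvFold_step, this]

-- ===== VERDICT (by name: the statement is the Claim_ definition above) =====
theorem maxsublen_spec : Claim_equal_maxsublen := by
  intro arr letters _
  unfold Spec_maxsublen maxsublen_alt
  rw [pvMain arr letters []]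
  simp
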